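-- pv_equiv track=rewrite | github.com/Chunn241529/FourTAgent | app/services/affiliate/smart_reup.py | reorder_transforms
-- ===== SOURCE A (Python) =====
-- from typing import Optional, Dict, Any, List
--
-- def reorder_transforms(transforms: List[str]) -> List[str]:
--     """
--     Reorder transforms to ensure correct pipeline order:
--     - strip_audio always runs last (after speed/pitch which need audio)
--     - trim_end runs before strip_audio but after visual transforms
--     - mirror and flip_h are treated as the same operation (deduplicated)
--     """
--     result = []
--     seen = set()
--     strip_audio = None
--     trim_end = None
--
--     # mirror and flip_h are the same hflip operation
--     EQUIVALENT_GROUPS = {"mirror": "hflip_group", "flip_h": "hflip_group"}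
--
--     for t in transforms:
--         if t == "strip_audio":
--             strip_audio = t
--             continue
--         if t == "trim_end":
--             trim_end = t
--             continue
--
--         # Check equivalence groups
--         group_key = EQUIVALENT_GROUPS.get(t, t)
--         if group_key in seen:
--             continue
--         seen.add(group_key)
--         result.append(t)
--
--     # trim_end before strip_audio, both at end
--     if trim_end:
--         result.append(trim_end)
--     if strip_audio:
--         result.append(strip_audio)
--     return result
-- ===== SOURCE B (Python) =====
-- from typing import List
--
-- def reorder_transforms(transforms: List[str]) -> List[str]:
--     """Dedup via an insertion-ordered dict keyed by equivalence group (first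
--     occurrence wins), then one stable sort that pushes trim_end and
--     strip_audio to the end in that order."""
--     EQUIVALENT_GROUPS = {"mirror": "hflip_group", "flip_h": "hflip_group"}
--     PRIORITY = {"trim_end": 1, "strip_audio": 2}
--     uniq = {}
--     for t in transforms:
--         uniq.setdefault(EQUIVALENT_GROUPS.get(t, t), t)
--     return sorted(uniq.values(), key=lambda v: PRIORITY.get(v, 0))
-- ===== Notes on version B (the rewrite author's own statement) =====
-- stated objective: alternative
-- what changed: B replaces A's three accumulators (result list plus strip_audio/trim_end variables appended afterwards) by a single insertion-ordered dict keyed by equivalence group (setdefault, first occurrence wins) followed by one stable sort that pushes trim_end and strip_audio to the end.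
import Mathlib
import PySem

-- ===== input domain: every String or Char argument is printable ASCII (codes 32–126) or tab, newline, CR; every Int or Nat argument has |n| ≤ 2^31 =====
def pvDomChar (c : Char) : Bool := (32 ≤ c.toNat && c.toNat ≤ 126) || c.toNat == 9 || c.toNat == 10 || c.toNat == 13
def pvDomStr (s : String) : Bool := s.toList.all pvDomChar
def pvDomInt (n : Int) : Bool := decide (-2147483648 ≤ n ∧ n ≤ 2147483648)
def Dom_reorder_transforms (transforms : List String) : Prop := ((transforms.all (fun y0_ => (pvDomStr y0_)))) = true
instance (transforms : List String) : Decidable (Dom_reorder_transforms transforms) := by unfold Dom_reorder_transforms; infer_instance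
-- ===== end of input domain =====

-- B replaces A's three accumulators (result list / strip_audio / trim_end variables) by one
-- insertion-ordered dict keyed by equivalence group plus one stable sort by priority; same results,
-- a different decomposition (objective: alternative).

-- ===== PORT A =====
-- EQUIVALENT_GROUPS dict of A
def pvEqGroupsA : PySem.Dict String String :=
  PySem.Dict.ofList [("mirror", "hflip_group"), ("flip_h", "hflip_group")]

-- one iteration of A's for-loop over state (result, seen, strip_audio, trim_end)
def pvStepA (s : List String × PySem.Set String × Option String × Option String) (t : String) :
    List String × PySem.Set String × Option String × Option String :=
  if t == "strip_audio" then (s.1, s.2.1, some t, s.2.2.2)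
  else if t == "trim_end" then (s.1, s.2.1, s.2.2.1, some t)
  else
    let group_key := pvEqGroupsA.getD t t
    if s.2.1.contains group_key then s
    else (s.1 ++ [t], s.2.1.add group_key, s.2.2.1, s.2.2.2)

def reorder_transforms (transforms : List String) : List String :=
  let st := transforms.foldl pvStepA ([], PySem.Set.empty, none, none)
  let result := match st.2.2.2 with
    | some te => st.1 ++ [te]      -- if trim_end: result.append(trim_end)
    | none => st.1
  match st.2.2.1 with
    | some sa => result ++ [sa]    -- if strip_audio: result.append(strip_audio)
    | none => result

-- ===== PORT B =====
def pvEqGroupsB : PySem.Dict String String :=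
  PySem.Dict.ofList [("mirror", "hflip_group"), ("flip_h", "hflip_group")]

def pvPriorityB : PySem.Dict String Int :=
  PySem.Dict.ofList [("trim_end", 1), ("strip_audio", 2)]

-- uniq.setdefault(EQUIVALENT_GROUPS.get(t, t), t)
def pvStepB (d : PySem.Dict String String) (t : String) : PySem.Dict String String :=
  d.setdefault (pvEqGroupsB.getD t t) t

def reorder_transforms_alt (transforms : List String) : List String :=
  let uniq := transforms.foldl pvStepB PySem.Dict.empty
  PySem.List.sorted uniq.values (fun v => pvPriorityB.getD v 0) false

-- ===== PRECONDITION & SPEC =====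
def Spec_reorder_transforms (transforms : List String) (out : List String) : Prop := out = reorder_transforms_alt transforms
instance (transforms : List String) (out : List String) : Decidable (Spec_reorder_transforms transforms out) := by unfold Spec_reorder_transforms; infer_instance

-- ===== CLAIM (what is proved, stated in full; the proofs are below) =====
def Claim_equal_reorder_transforms : Prop := ∀ (transforms : List String), Dom_reorder_transforms transforms → Spec_reorder_transforms transforms (reorder_transforms transforms)

-- ===== LEMMAS AND PROOFS =====

-- the group key of A = the group key of B, as an explicit if-chain
theorem pv_getD_eqGroups (t : String) :
    pvEqGroupsA.getD t t = if t = "mirror" then "hflip_group" else if t = "flip_h" then "hflip_group" else t := by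
  have h : pvEqGroupsA = PySem.Dict.mk [("mirror", "hflip_group"), ("flip_h", "hflip_group")] := by decide
  by_cases h1 : t = "mirror"
  · subst h1; decide
  by_cases h2 : t = "flip_h"
  · subst h2; decide
  rw [h, PySem.Dict.getD_eq_get?_getD, PySem.Dict.get?_mk_cons, PySem.Dict.get?_mk_cons]
  simp [PySem.Dict.get?, beq_iff_eq, Ne.symm h1, Ne.symm h2, h1, h2]

theorem pv_eqGroupsAB : pvEqGroupsB = pvEqGroupsA := by decide

-- B's priority function, as an explicit if-chain
theorem pv_prio (v : String) :
    pvPriorityB.getD v 0 = if v = "trim_end" then 1 else if v = "strip_audio" then 2 else 0 := by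
  have h : pvPriorityB = PySem.Dict.mk [("trim_end", (1:Int)), ("strip_audio", 2)] := by decide
  by_cases h1 : v = "trim_end"
  · subst h1; decide
  by_cases h2 : v = "strip_audio"
  · subst h2; decide
  rw [h, PySem.Dict.getD_eq_get?_getD, PySem.Dict.get?_mk_cons, PySem.Dict.get?_mk_cons]
  simp [PySem.Dict.get?, beq_iff_eq, Ne.symm h1, Ne.symm h2, h1, h2]

-- the group of a non-special token is non-special
theorem pv_group_ne {t : String} (h1 : ¬ t = "trim_end") (h2 : ¬ t = "strip_audio") :
    ¬ pvEqGroupsA.getD t t = "trim_end" ∧ ¬ pvEqGroupsA.getD t t = "strip_audio" := by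
  rw [pv_getD_eqGroups]
  split_ifs <;> simp_all

-- stable insertion: x goes between the not-before prefix and the before suffix
theorem pv_insertBy_append {α : Type} (before : α → α → Bool) (x : α) :
    ∀ (as bs : List α), (∀ a ∈ as, before x a = false) → (∀ b ∈ bs, before x b = true) →
      PySem.List.insertBy before x (as ++ bs) = as ++ x :: bs := by
  intro as
  induction as with
  | nil =>
    intro bs _ h2
    cases bs with
    | nil => simp [PySem.List.insertBy]
    | cons b bs' => simp [PySem.List.insertBy, h2 b (by simp)]
  | cons a as' ih =>
    intro bs h1 h2
    have ha : before x a = false := h1 a (by simp)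
    simp only [List.cons_append, PySem.List.insertBy, ha]
    simp [ih bs (fun a' ha' => h1 a' (by simp [ha'])) h2]

-- a stable sort whose keys take only the values 0,1,2 is three filters in order
theorem pv_foldl_ins_buckets {α : Type} (key : α → Int) :
    ∀ (vs A0 A1 A2 : List α),
      (∀ x ∈ vs, key x = 0 ∨ key x = 1 ∨ key x = 2) →
      (∀ a ∈ A0, key a = 0) → (∀ a ∈ A1, key a = 1) → (∀ a ∈ A2, key a = 2) →
      vs.foldl (fun acc x => PySem.List.insertBy (fun a b => decide (key a < key b)) x acc) (A0 ++ A1 ++ A2) =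
        (A0 ++ vs.filter (fun x => key x == 0)) ++ (A1 ++ vs.filter (fun x => key x == 1)) ++
          (A2 ++ vs.filter (fun x => key x == 2)) := by
  intro vs
  induction vs with
  | nil => intro A0 A1 A2 _ _ _ _; simp
  | cons x vs' ih =>
    intro A0 A1 A2 hk h0 h1 h2
    have hx := hk x (by simp)
    have hk' : ∀ y ∈ vs', key y = 0 ∨ key y = 1 ∨ key y = 2 := fun y hy => hk y (by simp [hy])
    rcases hx with hx | hx | hx
    · have hins : PySem.List.insertBy (fun a b => decide (key a < key b)) x (A0 ++ (A1 ++ A2)) = A0 ++ x :: (A1 ++ A2) := by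
        apply pv_insertBy_append
        · intro a ha; simp [hx, h0 a ha]
        · intro b hb
          rcases List.mem_append.mp hb with hb | hb
          · simp [hx, h1 b hb]
          · simp [hx, h2 b hb]
      have := ih (A0 ++ [x]) A1 A2 hk'
        (fun a ha => (List.mem_append.mp ha).elim (h0 a)
          (fun h => by simp only [List.mem_singleton] at h; subst h; exact hx)) h1 h2
      simp only [List.foldl_cons, List.append_assoc, hins]
      simp only [List.append_assoc] at this
      rw [show A0 ++ x :: (A1 ++ A2) = A0 ++ [x] ++ (A1 ++ A2) by simp, List.append_assoc, this]
      simp [hx]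
    · have hins : PySem.List.insertBy (fun a b => decide (key a < key b)) x ((A0 ++ A1) ++ A2) = (A0 ++ A1) ++ x :: A2 := by
        apply pv_insertBy_append
        · intro a ha
          rcases List.mem_append.mp ha with h | h
          · simp [hx, h0 a h]
          · simp [hx, h1 a h]
        · intro b hb; simp [hx, h2 b hb]
      have := ih A0 (A1 ++ [x]) A2 hk' h0
        (fun a ha => (List.mem_append.mp ha).elim (h1 a)
          (fun h => by simp only [List.mem_singleton] at h; subst h; exact hx)) h2
      simp only [List.foldl_cons, ← List.append_assoc, hins]
      rw [show (A0 ++ A1) ++ x :: A2 = A0 ++ (A1 ++ [x]) ++ A2 by simp]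
      simp only [← List.append_assoc] at this ⊢
      rw [this]
      simp [hx]
    · have hins : PySem.List.insertBy (fun a b => decide (key a < key b)) x (A0 ++ A1 ++ A2) = (A0 ++ A1 ++ A2) ++ [x] := by
        apply PySem.List.insertBy_of_forall_not_before
        intro a ha
        rcases List.mem_append.mp ha with h | h
        · rcases List.mem_append.mp h with h' | h'
          · simp [hx, h0 a h']
          · simp [hx, h1 a h']
        · simp [hx, h2 a h]
      have := ih A0 A1 (A2 ++ [x]) hk' h0 h1
        (fun a ha => (List.mem_append.mp ha).elim (h2 a)
          (fun h => by simp only [List.mem_singleton] at h; subst h; exact hx))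
      simp only [List.foldl_cons, hins]
      rw [show (A0 ++ A1 ++ A2) ++ [x] = A0 ++ A1 ++ (A2 ++ [x]) by simp]
      simp only [← List.append_assoc] at this ⊢
      rw [this]
      simp [hx]

theorem pv_sorted_buckets {α : Type} (key : α → Int) (vs : List α)
    (hk : ∀ x ∈ vs, key x = 0 ∨ key x = 1 ∨ key x = 2) :
    PySem.List.sorted vs key false =
      vs.filter (fun x => key x == 0) ++ vs.filter (fun x => key x == 1) ++ vs.filter (fun x => key x == 2) := by
  rw [PySem.List.sorted_eq_foldl_insertBy]
  have := pv_foldl_ins_buckets key vs [] [] [] hk (by simp) (by simp) (by simp)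
  simpa using this

-- non-special bucket test, shared by the invariant
def pvQ0 (v : String) : Bool := !(v == "trim_end") && !(v == "strip_audio")

-- appending one pair to a dict's item list, read through contains / values
theorem pv_contains_append (d : PySem.Dict String String) (k v g : String) :
    (PySem.Dict.mk (d.items ++ [(k, v)])).contains g = (d.contains g || k == g) := by
  simp [PySem.Dict.contains, List.any_append]

theorem pv_values_append (d : PySem.Dict String String) (k v : String) :
    (PySem.Dict.mk (d.items ++ [(k, v)])).values = d.values ++ [v] := by
  simp [PySem.Dict.values]

-- the option accumulator ↔ dict-key description used for each special token
def pvOptInv (d : PySem.Dict String String) (o : Option String) (s : String) : Prop :=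
  (o = none ∧ d.contains s = false ∧ d.values.filter (fun v => v == s) = []) ∨
  (o = some s ∧ d.contains s = true ∧ d.values.filter (fun v => v == s) = [s])

-- pvOptInv survives appending a pair whose key and value are another token
theorem pv_optInv_append_other {d : PySem.Dict String String} {o : Option String} {s : String}
    (k v : String) (hk : ¬ k = s) (hv : ¬ v = s) (h : pvOptInv d o s) :
    pvOptInv (PySem.Dict.mk (d.items ++ [(k, v)])) o s := by
  rcases h with ⟨a, b, c⟩ | ⟨a, b, c⟩
  · refine Or.inl ⟨a, ?_, ?_⟩
    · rw [pv_contains_append, b]; simp [hk]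
    · rw [pv_values_append, List.filter_append, c]; simp [hv]
  · refine Or.inr ⟨a, ?_, ?_⟩
    · rw [pv_contains_append, b]; simp
    · rw [pv_values_append, List.filter_append, c]; simp [hv]

-- pvOptInv after the first insertion of the special token itself
theorem pv_optInv_append_self {d : PySem.Dict String String} (s : String)
    (hc : d.contains s = false) (hf : d.values.filter (fun v => v == s) = []) :
    pvOptInv (PySem.Dict.mk (d.items ++ [(s, s)])) (some s) s := by
  refine Or.inr ⟨rfl, ?_, ?_⟩
  · rw [pv_contains_append, hc]; simp
  · rw [pv_values_append, List.filter_append, hf]; simp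

-- the loop invariant: A's four accumulators are readable off B's dict
theorem pv_loop_inv :
    ∀ (ts : List String) (res : List String) (seen : PySem.Set String) (sa te : Option String)
      (d : PySem.Dict String String),
      d.values.filter pvQ0 = res →
      pvOptInv d te "trim_end" →
      pvOptInv d sa "strip_audio" →
      (∀ g : String, ¬ g = "trim_end" → ¬ g = "strip_audio" → seen.contains g = d.contains g) →
      ((ts.foldl pvStepB d).values.filter pvQ0 = (ts.foldl pvStepA (res, seen, sa, te)).1 ∧
        pvOptInv (ts.foldl pvStepB d) (ts.foldl pvStepA (res, seen, sa, te)).2.2.2 "trim_end" ∧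
        pvOptInv (ts.foldl pvStepB d) (ts.foldl pvStepA (res, seen, sa, te)).2.2.1 "strip_audio") := by
  intro ts
  induction ts with
  | nil => intro res seen sa te d h0 h1 h2 _; exact ⟨h0, h1, h2⟩
  | cons t ts' ih =>
    intro res seen sa te d h0 h1 h2 hseen
    simp only [List.foldl_cons]
    by_cases ht1 : t = "strip_audio"
    · subst ht1
      have hA : pvStepA (res, seen, sa, te) "strip_audio" = (res, seen, some "strip_audio", te) := by
        simp [pvStepA]
      rw [hA]
      rcases h2 with ⟨h2o, h2c, h2f⟩ | ⟨h2o, h2c, h2f⟩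
      · -- not yet in the dict: B appends the pair
        have hB : pvStepB d "strip_audio" =
            PySem.Dict.mk (d.items ++ [("strip_audio", "strip_audio")]) := by
          simp [pvStepB, PySem.Dict.setdefault, show pvEqGroupsB.getD "strip_audio" "strip_audio" = "strip_audio" from by decide, h2c]
        rw [hB]
        apply ih
        · rw [pv_values_append, List.filter_append, h0]; simp [pvQ0]
        · exact pv_optInv_append_other _ _ (by decide) (by decide) h1
        · exact pv_optInv_append_self _ h2c h2f
        · intro g hg1 hg2
          rw [pv_contains_append, hseen g hg1 hg2]
          simp [Ne.symm hg2]
      · have hB : pvStepB d "strip_audio" = d := by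
          simp [pvStepB, PySem.Dict.setdefault, show pvEqGroupsB.getD "strip_audio" "strip_audio" = "strip_audio" from by decide, h2c]
        rw [hB]
        exact ih res seen (some "strip_audio") te d h0 h1 (Or.inr ⟨rfl, h2c, h2f⟩) hseen
    · by_cases ht2 : t = "trim_end"
      · subst ht2
        have hA : pvStepA (res, seen, sa, te) "trim_end" = (res, seen, sa, some "trim_end") := by
          simp [pvStepA]
        rw [hA]
        rcases h1 with ⟨h1o, h1c, h1f⟩ | ⟨h1o, h1c, h1f⟩
        · have hB : pvStepB d "trim_end" =
              PySem.Dict.mk (d.items ++ [("trim_end", "trim_end")]) := by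
            simp [pvStepB, PySem.Dict.setdefault, show pvEqGroupsB.getD "trim_end" "trim_end" = "trim_end" from by decide, h1c]
          rw [hB]
          apply ih
          · rw [pv_values_append, List.filter_append, h0]; simp [pvQ0]
          · exact pv_optInv_append_self _ h1c h1f
          · exact pv_optInv_append_other _ _ (by decide) (by decide) h2
          · intro g hg1 hg2
            rw [pv_contains_append, hseen g hg1 hg2]
            simp [Ne.symm hg1]
        · have hB : pvStepB d "trim_end" = d := by
            simp [pvStepB, PySem.Dict.setdefault, show pvEqGroupsB.getD "trim_end" "trim_end" = "trim_end" from by decide, h1c]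
          rw [hB]
          exact ih res seen sa (some "trim_end") d h0 (Or.inr ⟨rfl, h1c, h1f⟩) h2 hseen
      · -- a visual token; its group key is non-special
        have hgrp := pv_group_ne ht2 ht1
        have hkeyB : pvEqGroupsB.getD t t = pvEqGroupsA.getD t t := by rw [pv_eqGroupsAB]
        have hsc : seen.contains (pvEqGroupsA.getD t t) = d.contains (pvEqGroupsA.getD t t) :=
          hseen _ hgrp.1 hgrp.2
        by_cases hct : d.contains (pvEqGroupsA.getD t t) = true
        · have hmem : pvEqGroupsA.getD t t ∈ seen := by
            have := hsc.trans hct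
            simpa [PySem.Set.contains] using this
          have hA : pvStepA (res, seen, sa, te) t = (res, seen, sa, te) := by
            simp [pvStepA, ht1, ht2, hmem]
          have hB : pvStepB d t = d := by
            simp [pvStepB, hkeyB, PySem.Dict.setdefault, hct]
          rw [hA, hB]
          exact ih res seen sa te d h0 h1 h2 hseen
        · have hctf : d.contains (pvEqGroupsA.getD t t) = false := by simpa using hct
          have hmem : pvEqGroupsA.getD t t ∉ seen := by
            have := hsc.trans hctf
            simpa [PySem.Set.contains] using this
          have hA : pvStepA (res, seen, sa, te) t =
              (res ++ [t], seen.add (pvEqGroupsA.getD t t), sa, te) := by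
            simp [pvStepA, ht1, ht2, hmem]
          have hB : pvStepB d t = PySem.Dict.mk (d.items ++ [(pvEqGroupsA.getD t t, t)]) := by
            simp [pvStepB, hkeyB, PySem.Dict.setdefault, hctf]
          rw [hA, hB]
          apply ih
          · rw [pv_values_append, List.filter_append, h0]; simp [pvQ0, ht1, ht2]
          · exact pv_optInv_append_other _ _ hgrp.1 ht2 h1
          · exact pv_optInv_append_other _ _ hgrp.2 ht1 h2
          · intro g hg1 hg2
            rw [pv_contains_append]
            by_cases hgk : g = pvEqGroupsA.getD t t
            · subst hgk
              simp only [beq_self_eq_true, Bool.or_true]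
              simp only [PySem.Set.add, PySem.Set.contains]
              split <;> simp_all
            · have hbne : (pvEqGroupsA.getD t t == g) = false := by
                simp only [beq_eq_false_iff_ne, ne_eq]; exact fun h => hgk h.symm
              rw [hbne, Bool.or_false, ← hseen g hg1 hg2]
              simp only [PySem.Set.add, PySem.Set.contains]
              split
              · rfl
              · simp [hgk]

theorem reorder_transforms_eq (transforms : List String) :
    reorder_transforms transforms = reorder_transforms_alt transforms := by
  obtain ⟨h0, h1, h2⟩ := pv_loop_inv transforms [] PySem.Set.empty none none PySem.Dict.empty
    (by decide) (Or.inl (by decide)) (Or.inl (by decide))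
    (by intro g _ _
        simp [PySem.Set.empty, PySem.Set.contains, PySem.Dict.empty, PySem.Dict.contains])
  unfold reorder_transforms reorder_transforms_alt
  simp only []
  have hk : ∀ v ∈ (transforms.foldl pvStepB PySem.Dict.empty).values,
      pvPriorityB.getD v 0 = 0 ∨ pvPriorityB.getD v 0 = 1 ∨ pvPriorityB.getD v 0 = 2 := by
    intro v _
    rw [pv_prio]
    split_ifs <;> simp
  rw [pv_sorted_buckets _ _ hk]
  have f0 : (transforms.foldl pvStepB PySem.Dict.empty).values.filter (fun x => pvPriorityB.getD x 0 == 0) =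
      (transforms.foldl pvStepB PySem.Dict.empty).values.filter pvQ0 := by
    apply List.filter_congr
    intro v _
    rw [pv_prio]
    by_cases e1 : v = "trim_end" <;> by_cases e2 : v = "strip_audio" <;> simp [pvQ0, e1, e2]
  have f1 : (transforms.foldl pvStepB PySem.Dict.empty).values.filter (fun x => pvPriorityB.getD x 0 == 1) =
      (transforms.foldl pvStepB PySem.Dict.empty).values.filter (fun v => v == "trim_end") := by
    apply List.filter_congr
    intro v _
    rw [pv_prio]
    by_cases e1 : v = "trim_end" <;> by_cases e2 : v = "strip_audio" <;> simp [e1, e2]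
  have f2 : (transforms.foldl pvStepB PySem.Dict.empty).values.filter (fun x => pvPriorityB.getD x 0 == 2) =
      (transforms.foldl pvStepB PySem.Dict.empty).values.filter (fun v => v == "strip_audio") := by
    apply List.filter_congr
    intro v _
    rw [pv_prio]
    by_cases e1 : v = "trim_end" <;> by_cases e2 : v = "strip_audio" <;> simp [e1, e2]
  rw [f0, f1, f2, h0]
  rcases h1 with ⟨e1, _, g1⟩ | ⟨e1, _, g1⟩ <;> rcases h2 with ⟨e2, _, g2⟩ | ⟨e2, _, g2⟩ <;>
    rw [e1, e2, g1, g2] <;> simp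

-- ===== VERDICT (by name: the statement is the Claim_ definition above) =====
theorem reorder_transforms_spec : Claim_equal_reorder_transforms := by
  intro transforms _
  unfold Spec_reorder_transforms
  exact reorder_transforms_eq transforms
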